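-- pv_equiv track=rewrite | github.com/jsvana/aoc | 2016/day7/part2.py | get_abas
-- ===== SOURCE A (Python) =====
-- def aba(chars):
--     return chars[0] == chars[2] and chars[0] != chars[1]
--
-- def get_abas(line):
--     in_bracket = False
--     matches = False
--
--     abas = set()
--     babs = set()
--     for i in range(len(line) - 2):
--         word = line[i:i+3]
--         if word[0] == '[':
--             in_bracket = True
--             continue
--         if word[0] == ']':
--             in_bracket = False
--             continue
--         if any([c in word for c in '[]']):
--             continue
--         if aba(word):
--             if in_bracket:
--                 babs.add(word)
--             else:
--                 abas.add(word)
--     return abas, babs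
-- ===== SOURCE B (Python) =====
-- def aba(chars):
--     return chars[0] == chars[2] and chars[0] != chars[1]
--
-- def get_abas(line):
--     # tokenize into (text, in_bracket) segments, then scan 3-char windows per segment
--     segments = []
--     buf = ''
--     in_bracket = False
--     for c in line:
--         if c == '[' or c == ']':
--             segments.append((buf, in_bracket))
--             buf = ''
--             in_bracket = c == '['
--         else:
--             buf += c
--     segments.append((buf, in_bracket))
--
--     abas = set()
--     babs = set()
--     for seg, inside in segments:
--         for j in range(len(seg) - 2):
--             word = seg[j:j+3]
--             if aba(word):
--                 (babs if inside else abas).add(word)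
--     return abas, babs
-- ===== Notes on version B (the rewrite author's own statement) =====
-- stated objective: faster
-- what changed: B first tokenizes the line into (text, in_bracket) segments in one character walk, then collects ABA matches from each segment's 3-char windows, instead of A's flat sliding-window pass that slices a 3-char window and re-checks bracket state and bracket membership for every position.
import Mathlib
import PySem

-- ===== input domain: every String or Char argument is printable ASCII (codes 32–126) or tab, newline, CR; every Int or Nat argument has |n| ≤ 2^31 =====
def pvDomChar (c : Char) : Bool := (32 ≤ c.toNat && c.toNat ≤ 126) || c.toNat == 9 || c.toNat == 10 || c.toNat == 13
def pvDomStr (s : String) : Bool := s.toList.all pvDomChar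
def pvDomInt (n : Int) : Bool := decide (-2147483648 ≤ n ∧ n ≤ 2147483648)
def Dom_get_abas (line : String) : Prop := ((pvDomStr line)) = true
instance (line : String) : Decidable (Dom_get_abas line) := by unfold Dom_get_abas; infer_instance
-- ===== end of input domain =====

-- B tokenizes the line into (text, in_bracket) segments and then scans each segment's
-- 3-char windows, instead of A's flat sliding-window pass with per-window bracket checks
-- (measured constant-factor speedup: no per-window bracket checks).

-- ===== PORT A =====
-- aba(chars); only ever called on 3-character windows (Option equality is exact there)
def abaA (w : List Char) : Bool :=
  (PySem.List.pyGet? w 0 == PySem.List.pyGet? w 2) && !(PySem.List.pyGet? w 0 == PySem.List.pyGet? w 1)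

-- the body of A's loop, acting on the current window 'word'
def bodyA (st : Bool × PySem.Set String × PySem.Set String) (word : List Char) :
    Bool × PySem.Set String × PySem.Set String :=
  if PySem.List.pyGet? word 0 == some '[' then (true, st.2.1, st.2.2)
  else if PySem.List.pyGet? word 0 == some ']' then (false, st.2.1, st.2.2)
  else if ['[', ']'].any (fun c => word.contains c) then st
  else if abaA word then
    (if st.1 then (st.1, st.2.1, PySem.Set.add st.2.2 (String.ofList word))
     else (st.1, PySem.Set.add st.2.1 (String.ofList word), st.2.2))
  else st

-- word = line[i:i+3], then the loop body
def stepA (cs : List Char) (st : Bool × PySem.Set String × PySem.Set String) (i : Int) :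
    Bool × PySem.Set String × PySem.Set String :=
  bodyA st (PySem.List.slice cs (some i) (some (i + 3)))

def get_abas (line : String) : List String × List String :=
  let cs := line.toList
  let st := (PySem.List.pyRange 0 ((cs.length : Int) - 2) 1).foldl (stepA cs)
    (false, PySem.Set.empty, PySem.Set.empty)
  (st.2.1, st.2.2)

-- ===== PORT B =====
def abaB (w : List Char) : Bool :=
  (PySem.List.pyGet? w 0 == PySem.List.pyGet? w 2) && !(PySem.List.pyGet? w 0 == PySem.List.pyGet? w 1)

-- body of B's inner loop: the window test for one segment with flag 'inside'
def bodyB (inside : Bool) (s : PySem.Set String × PySem.Set String) (word : List Char) :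
    PySem.Set String × PySem.Set String :=
  if abaB word then
    (if inside then (s.1, PySem.Set.add s.2 (String.ofList word))
     else (PySem.Set.add s.1 (String.ofList word), s.2))
  else s

-- word = seg[j:j+3], then the inner-loop body
def stepB (seg : List Char) (inside : Bool) (s : PySem.Set String × PySem.Set String) (j : Int) :
    PySem.Set String × PySem.Set String :=
  bodyB inside s (PySem.List.slice seg (some j) (some (j + 3)))

-- one step of B's tokenizing pass: flush the buffer on a bracket, else extend it
def tokStep (st : List (List Char × Bool) × List Char × Bool) (c : Char) :
    List (List Char × Bool) × List Char × Bool :=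
  if c == '[' || c == ']' then (st.1 ++ [(st.2.1, st.2.2)], [], c == '[')
  else (st.1, st.2.1 ++ [c], st.2.2)

def get_abas_alt (line : String) : List String × List String :=
  let p := line.toList.foldl tokStep ([], [], false)
  let segments := p.1 ++ [(p.2.1, p.2.2)]
  segments.foldl
    (fun s seg =>
      (PySem.List.pyRange 0 ((seg.1.length : Int) - 2) 1).foldl (stepB seg.1 seg.2) s)
    (PySem.Set.empty, PySem.Set.empty)

-- ===== PRECONDITION & SPEC =====
def Spec_get_abas (line : String) (out : List String × List String) : Prop := out = get_abas_alt line
instance (line : String) (out : List String × List String) : Decidable (Spec_get_abas line out) := by unfold Spec_get_abas; infer_instance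

-- ===== CLAIM (what is proved, stated in full; the proofs are below) =====
def Claim_equal_get_abas : Prop := ∀ (line : String), Dom_get_abas line → Spec_get_abas line (get_abas line)

-- ===== LEMMAS AND PROOFS =====

-- structural sliding-window recursion: apply g to each 3-char window in order
def winsFold {σ : Type} (g : σ → List Char → σ) : σ → List Char → σ
  | st, a :: x :: y :: t => winsFold g (g st [a, x, y]) (x :: y :: t)
  | st, _ => st

-- the Nat-range sliding-window fold is the structural recursion
theorem natFold {σ : Type} (g : σ → List Char → σ) :
    ∀ (cs : List Char) (st : σ),
      (List.range (cs.length - 2)).foldl (fun st k => g st ((cs.drop k).take 3)) st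
        = winsFold g st cs
  | [], st => by simp [winsFold]
  | [a], st => by simp [winsFold]
  | [a, x], st => by simp [winsFold]
  | a :: x :: y :: t, st => by
    have h : (a :: x :: y :: t).length - 2 = (x :: y :: t).length - 2 + 1 := by
      simp
    rw [h, List.range_succ_eq_map, List.foldl_cons, List.foldl_map]
    simp only [List.drop_succ_cons, List.drop_zero]
    rw [natFold g (x :: y :: t) (g st ((a :: x :: y :: t).take 3))]
    simp [winsFold]

-- the pyRange-and-slice window loop (shared shape of A's loop and B's inner loop)
-- is the structural recursion
theorem rangeFold {σ : Type} (g : σ → List Char → σ) (cs : List Char) (st : σ) :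
    (PySem.List.pyRange 0 ((cs.length : Int) - 2) 1).foldl
        (fun st i => g st (PySem.List.slice cs (some i) (some (i + 3)))) st
      = winsFold g st cs := by
  rw [PySem.List.pyRange_one, List.foldl_map]
  have hl : (((cs.length : Int) - 2) - 0).toNat = cs.length - 2 := by omega
  rw [hl]
  have hfun : ∀ (st : σ) (k : Nat),
      g st (PySem.List.slice cs (some ((0:Int) + k)) (some ((0:Int) + k + 3)))
        = g st ((cs.drop k).take 3) := by
    intro st k
    congr 1
    simpa using PySem.List.slice_natCast_add cs k 3
  simp only [hfun]
  exact natFold g cs st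

-- recursive form of B's tokenizer
def parseRec (buf : List Char) (inb : Bool) : List Char → List (List Char × Bool)
  | [] => [(buf, inb)]
  | c :: r =>
    if c == '[' || c == ']' then (buf, inb) :: parseRec [] (c == '[') r
    else parseRec (buf ++ [c]) inb r

-- B's foldl tokenizer (with the final flush appended) is parseRec
theorem tok_eq_parseRec :
    ∀ (cs : List Char) (segs : List (List Char × Bool)) (buf : List Char) (inb : Bool),
      (cs.foldl tokStep (segs, buf, inb)).1
          ++ [((cs.foldl tokStep (segs, buf, inb)).2.1, (cs.foldl tokStep (segs, buf, inb)).2.2)]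
        = segs ++ parseRec buf inb cs
  | [], segs, buf, inb => by simp [parseRec]
  | c :: r, segs, buf, inb => by
    by_cases h : c == '[' || c == ']'
    · simp only [List.foldl_cons, parseRec, h, if_pos, tokStep]
      rw [tok_eq_parseRec r]
      simp
    · simp only [List.foldl_cons, parseRec, tokStep, h]
      simp only [Bool.false_eq_true, if_false]
      rw [tok_eq_parseRec r]

-- over a bracket-free window, A's body is B's body (flag unchanged)
theorem bodyA_free (b : Bool) (s : PySem.Set String × PySem.Set String) (a x y : Char)
    (ha : a ≠ '[' ∧ a ≠ ']') (hx : x ≠ '[' ∧ x ≠ ']') (hy : y ≠ '[' ∧ y ≠ ']') :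
    bodyA (b, s) [a, x, y] = (b, bodyB b s [a, x, y]) := by
  obtain ⟨s1, s2⟩ := s
  have h0 : PySem.List.pyGet? [a, x, y] 0 = some a := by
    simp [PySem.List.pyGet?, PySem.List.pyIdx?]
  have hc : (['[', ']'].any fun c => List.contains [a, x, y] c) = false := by
    simp only [List.contains_eq_mem, List.mem_cons, List.not_mem_nil, or_false, Bool.decide_or,
      List.any_cons, List.any_nil, Bool.or_false, Bool.or_eq_false_iff, decide_eq_false_iff_not]
    exact ⟨⟨fun h => ha.1 h.symm, fun h => hx.1 h.symm, fun h => hy.1 h.symm⟩,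
           fun h => ha.2 h.symm, fun h => hx.2 h.symm, fun h => hy.2 h.symm⟩
  have e1 : (some a == some '[') = false := by simp [ha.1]
  have e2 : (some a == some ']') = false := by simp [ha.2]
  simp only [bodyA, bodyB, abaA, abaB, h0, hc, e1, e2, Bool.false_eq_true, if_false]
  split_ifs <;> rfl

-- a window whose head is not a bracket but that contains one is skipped
theorem bodyA_skip (st : Bool × PySem.Set String × PySem.Set String) (a x y : Char)
    (ha : a ≠ '[' ∧ a ≠ ']') (h : x = '[' ∨ x = ']' ∨ y = '[' ∨ y = ']') :
    bodyA st [a, x, y] = st := by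
  have h0 : PySem.List.pyGet? [a, x, y] 0 = some a := by
    simp [PySem.List.pyGet?, PySem.List.pyIdx?]
  have hc : (['[', ']'].any fun c => List.contains [a, x, y] c) = true := by
    simp only [List.contains_eq_mem, List.mem_cons, List.not_mem_nil, or_false, Bool.decide_or,
      List.any_cons, List.any_nil, Bool.or_false, Bool.or_eq_true, decide_eq_true_eq]
    rcases h with h | h | h | h
    · exact Or.inl (Or.inr (Or.inl h.symm))
    · exact Or.inr (Or.inr (Or.inl h.symm))
    · exact Or.inl (Or.inr (Or.inr h.symm))
    · exact Or.inr (Or.inr (Or.inr h.symm))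
  have e1 : (some a == some '[') = false := by simp [ha.1]
  have e2 : (some a == some ']') = false := by simp [ha.2]
  simp only [bodyA, h0, hc, e1, e2, Bool.false_eq_true, if_false, if_true]

-- a window whose head is a bracket only sets the flag
theorem bodyA_bracket (b : Bool) (s : PySem.Set String × PySem.Set String) (d x y : Char)
    (hd : d = '[' ∨ d = ']') :
    bodyA (b, s) [d, x, y] = ((d == '['), s) := by
  rcases hd with hd | hd <;> subst hd <;> simp [bodyA]

-- scanning a bracket-free segment followed by nothing-or-a-bracket:
-- A collects exactly that segment's windows with the current flag
theorem winsA_seg :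
    ∀ (seg : List Char) (rest : List Char) (b : Bool)
      (s : PySem.Set String × PySem.Set String),
      (∀ c ∈ seg, c ≠ '[' ∧ c ≠ ']') →
      (rest = [] ∨ ∃ d r, rest = d :: r ∧ (d = '[' ∨ d = ']')) →
      winsFold bodyA (b, s) (seg ++ rest)
        = winsFold bodyA (b, winsFold (bodyB b) s seg) rest := by
  intro seg
  induction seg with
  | nil => intro rest b s _ _; simp [winsFold]
  | cons a seg' ih =>
    intro rest b s hfree hrest
    have ha := hfree a (List.mem_cons_self ..)
    match seg', rest with
    | x :: y :: t, rest =>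
      have hx := hfree x (by simp)
      have hy := hfree y (by simp)
      show winsFold bodyA (bodyA (b, s) [a, x, y]) ((x :: y :: t) ++ rest) = _
      rw [bodyA_free b s a x y ha hx hy]
      rw [ih rest b (bodyB b s [a, x, y]) (fun c hc => hfree c (List.mem_cons_of_mem _ hc)) hrest]
      rfl
    | [x], [] => simp [winsFold]
    | [x], [d] =>
      rcases hrest with h | ⟨d', r', heq, hd⟩
      · simp at h
      · cases heq
        have hx := hfree x (by simp)
        show winsFold bodyA (bodyA (b, s) [a, x, d]) [x, d] = _
        rw [bodyA_skip _ a x d ha (by rcases hd with h|h <;> simp [h])]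
        simp [winsFold]
    | [x], d :: e :: r2 =>
      rcases hrest with h | ⟨d', r', heq, hd⟩
      · simp at h
      · cases heq
        have hx := hfree x (by simp)
        show winsFold bodyA (bodyA (b, s) [a, x, d]) (x :: d :: e :: r2) = _
        rw [bodyA_skip _ a x d ha (by rcases hd with h|h <;> simp [h])]
        show winsFold bodyA (bodyA (b, s) [x, d, e]) (d :: e :: r2) = _
        rw [bodyA_skip _ x d e hx (by rcases hd with h|h <;> simp [h])]
        simp [winsFold]
    | [], [] => simp [winsFold]
    | [], [d] => simp [winsFold]
    | [], d :: e :: r2 =>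
      rcases hrest with h | ⟨d', r', heq, hd⟩
      · simp at h
      · cases heq
        show winsFold bodyA (bodyA (b, s) [a, d, e]) (d :: e :: r2) = _
        rw [bodyA_skip _ a d e ha (by rcases hd with h|h <;> simp [h])]
        simp [winsFold]

-- consuming a leading bracket just sets the flag (the sets are unchanged)
theorem winsA_bracket (d : Char) (hd : d = '[' ∨ d = ']') (r : List Char) (b : Bool)
    (s : PySem.Set String × PySem.Set String) :
    (winsFold bodyA (b, s) (d :: r)).2 = (winsFold bodyA ((d == '['), s) r).2 := by
  match r with
  | [] => simp [winsFold]
  | [x] => simp [winsFold]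
  | x :: y :: t =>
    show (winsFold bodyA (bodyA (b, s) [d, x, y]) (x :: y :: t)).2 = _
    rw [bodyA_bracket b s d x y hd]

-- main invariant: A's scan of buf ++ cs computes B's per-segment pass over parseRec buf b cs
theorem main_inv :
    ∀ (cs buf : List Char) (b : Bool) (s : PySem.Set String × PySem.Set String),
      (∀ c ∈ buf, c ≠ '[' ∧ c ≠ ']') →
      (winsFold bodyA (b, s) (buf ++ cs)).2
        = (parseRec buf b cs).foldl (fun s seg => winsFold (bodyB seg.2) s seg.1) s := by
  intro cs
  induction cs with
  | nil =>
    intro buf b s hfree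
    have h := winsA_seg buf [] b s hfree (Or.inl rfl)
    simp only [List.append_nil] at h ⊢
    rw [h]
    simp [winsFold, parseRec]
  | cons c r ih =>
    intro buf b s hfree
    by_cases hc : c = '[' ∨ c = ']'
    · rw [winsA_seg buf (c :: r) b s hfree (Or.inr ⟨c, r, rfl, hc⟩)]
      rw [winsA_bracket c hc r b _]
      have ihr := ih [] (c == '[') (winsFold (bodyB b) s buf) (by simp)
      rw [List.nil_append] at ihr
      rw [ihr]
      have htrue : (c == '[' || c == ']') = true := by rcases hc with h | h <;> simp [h]
      simp [parseRec, htrue]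
    · push Not at hc
      rw [show buf ++ c :: r = (buf ++ [c]) ++ r by simp]
      rw [ih (buf ++ [c]) b s (by
        intro ch hch
        rcases List.mem_append.mp hch with h | h
        · exact hfree ch h
        · simp at h; subst h; exact hc)]
      have hfalse : (c == '[' || c == ']') = false := by simp [hc.1, hc.2]
      simp [parseRec, hfalse]

-- ===== VERDICT (by name: the statement is the Claim_ definition above) =====
theorem get_abas_spec : Claim_equal_get_abas := by
  intro line _
  unfold Spec_get_abas
  have hA : (PySem.List.pyRange 0 ((line.toList.length : Int) - 2) 1).foldl
        (stepA line.toList) (false, PySem.Set.empty, PySem.Set.empty)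
      = winsFold bodyA (false, PySem.Set.empty, PySem.Set.empty) line.toList :=
    rangeFold bodyA line.toList _
  have hfun : (fun (s : PySem.Set String × PySem.Set String) (seg : List Char × Bool) =>
        (PySem.List.pyRange 0 ((seg.1.length : Int) - 2) 1).foldl (stepB seg.1 seg.2) s)
      = fun s seg => winsFold (bodyB seg.2) s seg.1 := by
    funext s seg
    exact rangeFold (bodyB seg.2) seg.1 s
  have htok := tok_eq_parseRec line.toList [] [] false
  rw [List.nil_append] at htok
  have hmain := main_inv line.toList [] false (PySem.Set.empty, PySem.Set.empty) (by simp)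
  rw [List.nil_append] at hmain
  have hAeq : get_abas line
      = ((PySem.List.pyRange 0 ((line.toList.length : Int) - 2) 1).foldl
          (stepA line.toList) (false, PySem.Set.empty, PySem.Set.empty)).2 := rfl
  have hBeq : get_abas_alt line
      = ((line.toList.foldl tokStep ([], [], false)).1
            ++ [((line.toList.foldl tokStep ([], [], false)).2.1,
                 (line.toList.foldl tokStep ([], [], false)).2.2)]).foldl
          (fun (s : PySem.Set String × PySem.Set String) (seg : List Char × Bool) =>
            (PySem.List.pyRange 0 ((seg.1.length : Int) - 2) 1).foldl (stepB seg.1 seg.2) s)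
          (PySem.Set.empty, PySem.Set.empty) := rfl
  rw [hAeq, hBeq, hA, htok, hfun]
  exact hmain
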